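-- pv_equiv track=rewrite | github.com/Ephsylion/python-KyMup | kumir.py | makeRoom
-- ===== SOURCE A (Python) =====
-- walls = ['|','-','⌜','⌞','⌟','⌝', '\n']
--
-- player= 'O'
--
-- def makeRoom(x, y, spawn_x, spawn_y):
--     room = []
--     for i in range(x):
--         if len(room) < 1:
--             room = room+[walls[2]]
--             for a in range(y):
--                 room = room+[walls[1]]
--             room = room+[walls[5]]
--             room = room+[walls[6]]
--         elif i == x-1:
--             room = room+[walls[3]]
--             for b in range(y):
--                 room = room+[walls[1]]
--             room = room+[walls[4]]
--             room = room+[walls[6]]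
--         else:
--             room = room+[walls[0]]
--             for c in range(y):
--                 if spawn_x == i and spawn_y == c:
--                    room = room+[player]
--                 else:
--                     room = room+['*']
--             room = room+[walls[0]]
--             room = room+[walls[6]]
--     return room
-- ===== SOURCE B (Python) =====
-- walls = ['|','-','⌜','⌞','⌟','⌝', '\n']
--
-- player = 'O'
--
-- def makeRoom(x, y, spawn_x, spawn_y):
--     # Build the grid uniformly with list repetition, then place the player
--     # with a single computed index write.
--     if x <= 0:
--         return []
--     h = max(y, 0)
--     room = ['⌜'] + ['-'] * h + ['⌝', '\n']
--     room += (['|'] + ['*'] * h + ['|', '\n']) * (x - 2)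
--     if x >= 2:
--         room += ['⌞'] + ['-'] * h + ['⌟', '\n']
--     if 1 <= spawn_x <= x - 2 and 0 <= spawn_y < h:
--         room[spawn_x * (h + 3) + 1 + spawn_y] = player
--     return room
-- ===== Notes on version B (the rewrite author's own statement) =====
-- stated objective: faster
-- what changed: Instead of growing the list one cell at a time by repeated list concatenation with a per-cell spawn-equality test inside nested loops, B builds the rows uniformly with list repetition and places the player by one computed index assignment.
import Mathlib
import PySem

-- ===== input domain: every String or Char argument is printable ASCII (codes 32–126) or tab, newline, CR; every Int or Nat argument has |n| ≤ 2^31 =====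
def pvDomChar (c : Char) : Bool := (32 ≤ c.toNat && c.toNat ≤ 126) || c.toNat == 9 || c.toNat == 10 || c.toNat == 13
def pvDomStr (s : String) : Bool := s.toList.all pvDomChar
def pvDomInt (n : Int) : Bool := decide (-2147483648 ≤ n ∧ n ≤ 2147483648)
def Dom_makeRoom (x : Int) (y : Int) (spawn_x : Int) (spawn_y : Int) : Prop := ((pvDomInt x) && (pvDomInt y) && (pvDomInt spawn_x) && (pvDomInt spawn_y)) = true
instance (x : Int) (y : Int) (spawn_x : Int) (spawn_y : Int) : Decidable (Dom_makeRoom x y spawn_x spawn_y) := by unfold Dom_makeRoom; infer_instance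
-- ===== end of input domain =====

-- B builds the three kinds of rows uniformly with list repetition and places the player
-- by a single computed index write, instead of A's per-cell conditional inside nested loops.

-- ===== PORT A =====
def walls : List String := ["|", "-", "⌜", "⌞", "⌟", "⌝", "\n"]

def player : String := "O"

def makeRoom (x : Int) (y : Int) (spawn_x : Int) (spawn_y : Int) : List String :=
  (PySem.List.pyRange 0 x 1).foldl (fun room i =>
    if room.length < 1 then
      ((PySem.List.pyRange 0 y 1).foldl (fun r _ => r ++ [walls[1]!]) (room ++ [walls[2]!]))
        ++ [walls[5]!] ++ [walls[6]!]
    else if i = x - 1 then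
      ((PySem.List.pyRange 0 y 1).foldl (fun r _ => r ++ [walls[1]!]) (room ++ [walls[3]!]))
        ++ [walls[4]!] ++ [walls[6]!]
    else
      ((PySem.List.pyRange 0 y 1).foldl
          (fun r c => if spawn_x = i ∧ spawn_y = c then r ++ [player] else r ++ ["*"])
          (room ++ [walls[0]!]))
        ++ [walls[0]!] ++ [walls[6]!]) []

-- ===== PORT B =====
def makeRoom_alt (x : Int) (y : Int) (spawn_x : Int) (spawn_y : Int) : List String :=
  if x ≤ 0 then []
  else
    let h : Int := max y 0
    let room := ["⌜"] ++ List.replicate h.toNat "-" ++ ["⌝", "\n"]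
    let room := room ++
      (List.replicate (x - 2).toNat (["|"] ++ List.replicate h.toNat "*" ++ ["|", "\n"])).flatten
    let room := if 2 ≤ x then room ++ ["⌞"] ++ List.replicate h.toNat "-" ++ ["⌟", "\n"] else room
    if 1 ≤ spawn_x ∧ spawn_x ≤ x - 2 ∧ 0 ≤ spawn_y ∧ spawn_y < h then
      room.set (spawn_x * (h + 3) + 1 + spawn_y).toNat "O"
    else room

-- ===== PRECONDITION & SPEC =====
def Spec_makeRoom (x : Int) (y : Int) (spawn_x : Int) (spawn_y : Int) (out : List String) : Prop := out = makeRoom_alt x y spawn_x spawn_y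
instance (x : Int) (y : Int) (spawn_x : Int) (spawn_y : Int) (out : List String) : Decidable (Spec_makeRoom x y spawn_x spawn_y out) := by unfold Spec_makeRoom; infer_instance

-- ===== CLAIM (what is proved, stated in full; the proofs are below) =====
def Claim_equal_makeRoom : Prop := ∀ (x : Int) (y : Int) (spawn_x : Int) (spawn_y : Int), Dom_makeRoom x y spawn_x spawn_y → Spec_makeRoom x y spawn_x spawn_y (makeRoom x y spawn_x spawn_y)


-- ===== LEMMAS AND PROOFS =====

-- Row descriptions (proof helpers)
def rowTop (w : Nat) : List String := "⌜" :: (List.replicate w "-" ++ ["⌝", "\n"])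
def rowBot (w : Nat) : List String := "⌞" :: (List.replicate w "-" ++ ["⌟", "\n"])
def rowMidPlain (w : Nat) : List String := "|" :: (List.replicate w "*" ++ ["|", "\n"])
def rowMid (y sx sy i : Int) : List String :=
  "|" :: (((PySem.List.pyRange 0 y 1).map fun c => if sx = i ∧ sy = c then "O" else "*") ++ ["|", "\n"])
def chunkA (x y sx sy i : Int) : List String :=
  if i = x - 1 then rowBot y.toNat else rowMid y sx sy i

theorem dash_fold (y : Int) (init : List String) :
    (PySem.List.pyRange 0 y 1).foldl (fun r _ => r ++ ["-"]) init
      = init ++ List.replicate y.toNat "-" := by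
  rw [PySem.List.foldl_append_singleton_eq_map (f := fun _ => "-"), List.map_const']
  simp [PySem.List.length_pyRange_one]

theorem mid_fold (y sx sy i : Int) (init : List String) :
    (PySem.List.pyRange 0 y 1).foldl
        (fun r c => if sx = i ∧ sy = c then r ++ ["O"] else r ++ ["*"]) init
      = init ++ (PySem.List.pyRange 0 y 1).map (fun c => if sx = i ∧ sy = c then "O" else "*") := by
  have hb : (fun (r : List String) (c : Int) => if sx = i ∧ sy = c then r ++ ["O"] else r ++ ["*"])
      = (fun r c => r ++ [if sx = i ∧ sy = c then "O" else "*"]) := by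
    funext r c; split <;> rfl
  rw [hb, PySem.List.foldl_append_singleton_eq_map]

theorem A_body (x y sx sy : Int) (i : Int) (init : List String) (h : init ≠ []) :
    (if init.length < 1 then
      ((PySem.List.pyRange 0 y 1).foldl (fun r _ => r ++ [walls[1]!]) (init ++ [walls[2]!]))
        ++ [walls[5]!] ++ [walls[6]!]
    else if i = x - 1 then
      ((PySem.List.pyRange 0 y 1).foldl (fun r _ => r ++ [walls[1]!]) (init ++ [walls[3]!]))
        ++ [walls[4]!] ++ [walls[6]!]
    else
      ((PySem.List.pyRange 0 y 1).foldl
          (fun r c => if sx = i ∧ sy = c then r ++ [player] else r ++ ["*"])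
          (init ++ [walls[0]!]))
        ++ [walls[0]!] ++ [walls[6]!])
    = init ++ chunkA x y sx sy i := by
  have hlen : ¬ (init.length < 1) := by
    simp [List.length_eq_zero_iff, h]
  rw [if_neg hlen]
  by_cases hi : i = x - 1
  · rw [if_pos hi]
    show ((PySem.List.pyRange 0 y 1).foldl (fun r _ => r ++ ["-"]) (init ++ ["⌞"])) ++ ["⌟"] ++ ["\n"] = _
    rw [dash_fold]
    simp [chunkA, hi, rowBot]
  · rw [if_neg hi]
    show ((PySem.List.pyRange 0 y 1).foldl
        (fun r c => if sx = i ∧ sy = c then r ++ ["O"] else r ++ ["*"]) (init ++ ["|"])) ++ ["|"] ++ ["\n"] = _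
    rw [mid_fold]
    simp [chunkA, hi, rowMid]

theorem chunkA_ne_nil (x y sx sy i : Int) : chunkA x y sx sy i ≠ [] := by
  unfold chunkA rowBot rowMid; split <;> simp

theorem A_fold (x y sx sy : Int) (l : List Int) :
    ∀ (init : List String), init ≠ [] →
    l.foldl (fun room i =>
      if room.length < 1 then
        ((PySem.List.pyRange 0 y 1).foldl (fun r _ => r ++ [walls[1]!]) (room ++ [walls[2]!]))
          ++ [walls[5]!] ++ [walls[6]!]
      else if i = x - 1 then
        ((PySem.List.pyRange 0 y 1).foldl (fun r _ => r ++ [walls[1]!]) (room ++ [walls[3]!]))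
          ++ [walls[4]!] ++ [walls[6]!]
      else
        ((PySem.List.pyRange 0 y 1).foldl
            (fun r c => if sx = i ∧ sy = c then r ++ [player] else r ++ ["*"])
            (room ++ [walls[0]!]))
          ++ [walls[0]!] ++ [walls[6]!]) init
      = init ++ l.flatMap (chunkA x y sx sy) := by
  induction l with
  | nil => intro init _; simp
  | cons i l ih =>
    intro init h
    rw [List.foldl_cons, A_body x y sx sy i init h,
        ih (init ++ chunkA x y sx sy i) (by simp [chunkA_ne_nil]),
        List.flatMap_cons, List.append_assoc]

theorem makeRoom_norm (x y sx sy : Int) :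
    makeRoom x y sx sy
      = if x ≤ 0 then []
        else rowTop y.toNat ++ (PySem.List.pyRange 1 x 1).flatMap (chunkA x y sx sy) := by
  unfold makeRoom
  by_cases hx : x ≤ 0
  · rw [PySem.List.pyRange_one_eq_nil hx, if_pos hx]; rfl
  · rw [PySem.List.pyRange_one_cons (by omega : (0:Int) < x), List.foldl_cons, if_neg hx]
    have h0 : (([] : List String).length < 1) := by simp
    rw [if_pos h0]
    have htop : ((PySem.List.pyRange 0 y 1).foldl (fun r _ => r ++ [walls[1]!])
        (([] : List String) ++ [walls[2]!])) ++ [walls[5]!] ++ [walls[6]!] = rowTop y.toNat := by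
      show ((PySem.List.pyRange 0 y 1).foldl (fun r _ => r ++ ["-"]) ([] ++ ["⌜"])) ++ ["⌝"] ++ ["\n"] = _
      rw [dash_fold]; simp [rowTop]
    rw [htop, A_fold x y sx sy _ _ (by simp [rowTop])]
    norm_num

theorem rowMid_plain (y sx sy i : Int) (h : ∀ c : Int, 0 ≤ c → c < y → ¬(sx = i ∧ sy = c)) :
    rowMid y sx sy i = rowMidPlain y.toNat := by
  unfold rowMid rowMidPlain
  have : (PySem.List.pyRange 0 y 1).map (fun c => if sx = i ∧ sy = c then "O" else "*")
      = (PySem.List.pyRange 0 y 1).map (fun _ => "*") := by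
    apply List.map_congr_left
    intro c hc
    rw [PySem.List.mem_pyRange_one] at hc
    rw [if_neg (h c hc.1 hc.2)]
  rw [this, List.map_const']
  simp [PySem.List.length_pyRange_one]

theorem rowMid_set (y sx sy : Int) (h1 : 0 ≤ sy) (h2 : sy < y) :
    rowMid y sx sy sx = (rowMidPlain y.toNat).set (1 + sy.toNat) "O" := by
  unfold rowMid rowMidPlain
  rw [Nat.add_comm 1 sy.toNat, List.set_cons_succ,
      List.set_append_left _ _ (by simp; omega)]
  congr 2
  apply List.ext_getElem
  · simp [PySem.List.length_pyRange_one]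
  · intro k hk1 hk2
    simp only [List.getElem_map, PySem.List.getElem_pyRange_one]
    rw [List.getElem_set]
    have hkw : k < y.toNat := by simpa using hk2
    by_cases hbk : sy.toNat = k
    · have h1 : (sx = sx ∧ sy = 0 + (k : Int)) := ⟨rfl, by omega⟩
      simp [h1]
    · simp [hbk]
      omega

theorem flatMap_const_flatten {α β : Type} (l : List α) (k : List β) :
    l.flatMap (fun _ => k) = (List.replicate l.length k).flatten := by
  induction l with
  | nil => rfl
  | cons a l ih => simp [List.flatMap_cons, List.replicate_succ, ih]

theorem len_flatten_replicate {α : Type} (m : Nat) (r : List α) :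
    (List.replicate m r).flatten.length = m * r.length := by
  induction m with
  | zero => simp
  | succ m ih => simp [List.replicate_succ, ih, Nat.succ_mul]; ring

theorem flat_set (v : String) (m : Nat) (r : List String) (t : Nat) :
    ∀ (j0 : Nat), j0 < m → t < r.length →
    (List.range m).flatMap (fun k => if k = j0 then r.set t v else r)
      = ((List.replicate m r).flatten).set (j0 * r.length + t) v := by
  induction m with
  | zero => intro j0 h _; omega
  | succ m ih =>
    intro j0 hj ht
    rw [List.range_succ_eq_map, List.replicate_succ]
    simp only [List.flatMap_cons, List.flatMap_map, List.flatten_cons]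
    cases j0 with
    | zero =>
      rw [if_pos rfl]
      have htail : (List.range m).flatMap (fun k => if k.succ = 0 then r.set t v else r)
          = (List.replicate m r).flatten := by
        have : (fun (k : Nat) => if k.succ = 0 then r.set t v else r) = (fun _ => r) := by
          funext k; simp
        rw [this, flatMap_const_flatten, List.length_range]
      rw [htail, Nat.zero_mul, Nat.zero_add, List.set_append_left _ _ ht]
    | succ j =>
      rw [if_neg (by omega)]
      have hbody : (fun (k : Nat) => if k.succ = j.succ then r.set t v else r)
          = (fun k => if k = j then r.set t v else r) := by
        funext k; by_cases h : k = j <;> simp [h]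
      rw [hbody, ih j (by omega) ht]
      have hidx : j.succ * r.length + t = r.length + (j * r.length + t) := by
        simp [Nat.succ_mul]; ring
      rw [hidx, List.set_append_right _ _ (Nat.le_add_right _ _), Nat.add_sub_cancel_left]

theorem length_rowTop (w : Nat) : (rowTop w).length = w + 3 := by simp [rowTop]
theorem length_rowMidPlain (w : Nat) : (rowMidPlain w).length = w + 3 := by simp [rowMidPlain]

theorem mids_eq (x y sx sy : Int) (hx : 2 ≤ x) :
    (PySem.List.pyRange 1 (x-1) 1).flatMap (rowMid y sx sy)
      = (List.range (x-2).toNat).flatMap (fun k : Nat => rowMid y sx sy (1 + (k : Int))) := by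
  rw [PySem.List.pyRange_one]
  have : (x - 1 - 1).toNat = (x - 2).toNat := by omega
  rw [this, List.flatMap_map]

theorem makeRoom_main : ∀ (x y spawn_x spawn_y : Int),
    makeRoom x y spawn_x spawn_y = makeRoom_alt x y spawn_x spawn_y := by
  intro x y sx sy
  rw [makeRoom_norm]
  unfold makeRoom_alt
  by_cases hx0 : x ≤ 0
  · rw [if_pos hx0, if_pos hx0]
  rw [if_neg hx0, if_neg hx0]
  simp only []
  have hmax : (max y 0).toNat = y.toNat := by
    rcases le_total y 0 with h | h
    · rw [max_eq_right h]; omega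
    · rw [max_eq_left h]
  by_cases hx1 : x = 1
  · subst hx1
    rw [PySem.List.pyRange_one_eq_nil (by omega), List.flatMap_nil, List.append_nil]
    rw [if_neg (show ¬ (2:Int) ≤ 1 by omega)]
    rw [if_neg (show ¬ ((1:Int) ≤ sx ∧ sx ≤ 1 - 2 ∧ 0 ≤ sy ∧ sy < max y 0) by
      rintro ⟨h1, h2, -⟩; omega)]
    simp [rowTop, hmax]
  -- now 2 ≤ x
  have hx2 : 2 ≤ x := by omega
  have hsplit : PySem.List.pyRange 1 x 1 = PySem.List.pyRange 1 (x-1) 1 ++ [x-1] := by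
    have h2 := PySem.List.pyRange_one_succ_right (a := 1) (b := x-1) (by omega)
    have hxx : x - 1 + 1 = x := by ring
    rwa [hxx] at h2
  rw [hsplit, List.flatMap_append, List.flatMap_cons, List.flatMap_nil, List.append_nil]
  have hlast : chunkA x y sx sy (x-1) = rowBot y.toNat := if_pos rfl
  have hmidsc : (PySem.List.pyRange 1 (x-1) 1).flatMap (chunkA x y sx sy)
      = (PySem.List.pyRange 1 (x-1) 1).flatMap (rowMid y sx sy) := by
    rw [List.flatMap_def, List.flatMap_def]
    congr 1
    apply List.map_congr_left
    intro i hi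
    rw [PySem.List.mem_pyRange_one] at hi
    exact if_neg (by omega)
  rw [hlast, hmidsc, if_pos hx2]
  set m : Nat := (x - 2).toNat with hm
  by_cases hC : 1 ≤ sx ∧ sx ≤ x - 2 ∧ 0 ≤ sy ∧ sy < max y 0
  · -- player placed
    obtain ⟨hs1, hs2, hs3, hs4⟩ := hC
    have hy0 : 0 < y := by
      rcases le_total y 0 with h | h
      · rw [max_eq_right h] at hs4; omega
      · rcases lt_or_eq_of_le h with h' | h'
        · exact h'
        · rw [← h', max_self] at hs4; omega
    have hmaxy : max y 0 = y := max_eq_left (by omega)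
    rw [if_pos ⟨hs1, hs2, hs3, hs4⟩]
    rw [hmaxy] at hs4 ⊢
    set w : Nat := y.toNat with hw
    set a : Nat := sx.toNat with ha
    set b : Nat := sy.toNat with hb
    have hidx : (sx * (y + 3) + 1 + sy).toNat = a * (w + 3) + 1 + b := by
      have hsx : sx = (a : Int) := by omega
      have hyy : y = (w : Int) := by omega
      have hsy : sy = (b : Int) := by omega
      rw [hsx, hyy, hsy]
      have : (a : Int) * ((w : Int) + 3) + 1 + (b : Int) = ((a * (w + 3) + 1 + b : Nat) : Int) := by
        push_cast; ring
      rw [this, Int.toNat_natCast]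
    rw [hidx]
    -- rewrite A's middles as a single set over replicated rows
    have hrow : ∀ k : Nat, k < m → rowMid y sx sy (1 + (k : Int))
        = if k = a - 1 then (rowMidPlain w).set (1 + b) "O" else rowMidPlain w := by
      intro k hk
      by_cases hka : k = a - 1
      · rw [if_pos hka]
        have : (1 : Int) + (k : Int) = sx := by omega
        rw [this, rowMid_set y sx sy hs3 hs4]
      · rw [if_neg hka]
        apply rowMid_plain
        rintro c hc1 hc2 ⟨hsc, -⟩
        omega
    have hmids : (PySem.List.pyRange 1 (x-1) 1).flatMap (rowMid y sx sy)
        = ((List.replicate m (rowMidPlain w)).flatten).set ((a - 1) * (w + 3) + (1 + b)) "O" := by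
      rw [mids_eq x y sx sy hx2, ← hm]
      have : (List.range m).flatMap (fun k : Nat => rowMid y sx sy (1 + (k : Int)))
          = (List.range m).flatMap (fun k => if k = a - 1 then (rowMidPlain w).set (1 + b) "O" else rowMidPlain w) := by
        rw [List.flatMap_def, List.flatMap_def]
        congr 1
        apply List.map_congr_left
        intro k hk
        exact hrow k (by simpa using hk)
      rw [this, flat_set "O" m (rowMidPlain w) (1 + b) (a - 1) (by omega) (by rw [length_rowMidPlain]; omega),
          length_rowMidPlain]
    rw [hmids]
    -- now push the set through the appends on the B side
    have hset1 : a * (w + 3) + 1 + b = (w + 3) + ((a - 1) * (w + 3) + (1 + b)) := by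
      have := Nat.succ_pred_eq_of_pos (show 0 < a by omega)
      nlinarith [Nat.sub_add_cancel (show 1 ≤ a by omega)]
    have hlt : (a - 1) * (w + 3) + (1 + b) < (List.replicate m (rowMidPlain w)).flatten.length := by
      rw [len_flatten_replicate, length_rowMidPlain]
      have h1 : a - 1 + 1 ≤ m := by omega
      calc (a - 1) * (w + 3) + (1 + b) < (a - 1) * (w + 3) + (w + 3) := by omega
        _ = (a - 1 + 1) * (w + 3) := by ring
        _ ≤ m * (w + 3) := Nat.mul_le_mul_right _ h1
    have hL : (["⌜"] ++ List.replicate w "-" ++ ["⌝", "\n"] ++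
          (List.replicate m (["|"] ++ List.replicate w "*" ++ ["|", "\n"])).flatten ++
          ["⌞"] ++ List.replicate w "-" ++ ["⌟", "\n"])
        = rowTop w ++ ((List.replicate m (rowMidPlain w)).flatten ++ rowBot w) := by
      simp [rowTop, rowBot, rowMidPlain]
    rw [hset1, hL,
        List.set_append_right _ _ (by rw [length_rowTop]; omega), length_rowTop,
        Nat.add_sub_cancel_left, List.set_append_left _ _ hlt]
  · -- no player: every middle row is plain
    rw [if_neg hC]
    have hmids : (PySem.List.pyRange 1 (x-1) 1).flatMap (rowMid y sx sy)
        = (List.replicate m (rowMidPlain y.toNat)).flatten := by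
      have : (PySem.List.pyRange 1 (x-1) 1).flatMap (rowMid y sx sy)
          = (PySem.List.pyRange 1 (x-1) 1).flatMap (fun _ => rowMidPlain y.toNat) := by
        rw [List.flatMap_def, List.flatMap_def]
        congr 1
        apply List.map_congr_left
        intro i hi
        rw [PySem.List.mem_pyRange_one] at hi
        apply rowMid_plain
        rintro c hc1 hc2 ⟨hsc, hsyc⟩
        apply hC
        refine ⟨by omega, by omega, by omega, ?_⟩
        rcases le_total y 0 with h | h
        · omega
        · rw [max_eq_left h]; omega
      rw [this, flatMap_const_flatten, PySem.List.length_pyRange_one]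
      congr 2
      omega
    rw [hmids, hmax]
    simp [rowTop, rowBot, rowMidPlain]

-- ===== VERDICT (by name: the statement is the Claim_ definition above) =====
theorem makeRoom_spec : Claim_equal_makeRoom := by
  intro x y sx sy _
  unfold Spec_makeRoom
  exact makeRoom_main x y sx sy
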